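-- pv_equiv track=rewrite | github.com/deeps2710/PALB1_Python-Programming | balancing_consonants_with_vowels_ratio.py | countBalanced
-- ===== SOURCE A (Python) =====
-- def countBalanced(arr):
--     values=[]
--     vowels=set('aeiou')
--     for s in arr:
--         v=0
--         for ch in s:
--             if ch in vowels:
--                 v+=1
--         c=len(s)-v
--         values.append(v-c)
--     n=len(values)
--     count=0
--
--     #checking all subarrays
--     for i in range(n):
--         sum=0
--         for j in range(i,n):
--             sum+=values[j]
--             if sum==0:
--                 count+=1
--
--     return count
-- ===== SOURCE B (Python) =====
-- def countBalanced(arr):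
--     vowels = set('aeiou')
--     seen = {0: 1}
--     prefix = 0
--     count = 0
--     for s in arr:
--         v = 0
--         for ch in s:
--             if ch in vowels:
--                 v += 1
--         prefix += 2 * v - len(s)
--         k = seen.get(prefix, 0)
--         count += k
--         seen[prefix] = k + 1
--     return count
-- ===== Notes on version B (the rewrite author's own statement) =====
-- stated objective: faster
-- what changed: Replaced the O(n^2) scan over all subarray start/end pairs with a single pass keeping a running prefix sum and a hashmap of prefix-sum frequencies, counting balanced subarrays ending at each position.
import Mathlib
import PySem

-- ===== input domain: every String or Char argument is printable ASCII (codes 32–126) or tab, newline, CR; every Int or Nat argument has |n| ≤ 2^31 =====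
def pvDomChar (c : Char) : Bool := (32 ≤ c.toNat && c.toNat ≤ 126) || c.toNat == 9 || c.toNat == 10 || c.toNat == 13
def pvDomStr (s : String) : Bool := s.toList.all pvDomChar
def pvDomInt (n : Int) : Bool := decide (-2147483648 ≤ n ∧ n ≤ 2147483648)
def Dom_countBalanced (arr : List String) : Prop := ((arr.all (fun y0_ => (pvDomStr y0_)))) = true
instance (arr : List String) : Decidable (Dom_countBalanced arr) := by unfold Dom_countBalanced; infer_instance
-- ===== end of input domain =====

-- B replaces A's O(n^2) scan over all subarray start/end pairs by a single pass with a
-- running prefix sum and a hashmap of prefix-sum frequencies (objective: faster).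

-- ===== PORT A =====
def countBalanced (arr : List String) : Int :=
  let vowels : PySem.Set Char := PySem.Set.ofList "aeiou".toList
  let values : List Int :=
    arr.foldl (fun values s =>
      let v : Int := s.toList.foldl (fun v ch => if PySem.Set.contains vowels ch then v + 1 else v) 0
      let c : Int := PySem.Str.len s - v
      values ++ [v - c]) []
  let n : Int := PySem.List.len values
  (PySem.List.pyRange 0 n 1).foldl (fun count i =>
      ((PySem.List.pyRange i n 1).foldl
        (fun (p : Int × Int) j =>
          let sum := p.1 + PySem.List.pyGetD values j 0
          (sum, if sum = 0 then p.2 + 1 else p.2)) (0, count)).2) 0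

-- ===== PORT B =====
def countBalanced_alt (arr : List String) : Int :=
  let vowels : PySem.Set Char := PySem.Set.ofList "aeiou".toList
  (arr.foldl (fun (st : PySem.Dict Int Int × Int × Int) s =>
      let v : Int := s.toList.foldl (fun v ch => if PySem.Set.contains vowels ch then v + 1 else v) 0
      let pre : Int := st.2.1 + 2 * v - PySem.Str.len s
      let k : Int := st.1.getD pre 0
      (st.1.insert pre (k + 1), pre, st.2.2 + k))
    ((PySem.Dict.empty : PySem.Dict Int Int).insert 0 1, 0, 0)).2.2

-- ===== PRECONDITION & SPEC =====
def Spec_countBalanced (arr : List String) (out : Int) : Prop := out = countBalanced_alt arr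
instance (arr : List String) (out : Int) : Decidable (Spec_countBalanced arr out) := by unfold Spec_countBalanced; infer_instance

-- ===== CLAIM (what is proved, stated in full; the proofs are below) =====
def Claim_equal_countBalanced : Prop := ∀ (arr : List String), Dom_countBalanced arr → Spec_countBalanced arr (countBalanced arr)

-- ===== LEMMAS AND PROOFS =====

/-- the per-string vowel count, exactly as both ports compute it -/
def pvV (s : String) : Int :=
  s.toList.foldl (fun v ch => if PySem.Set.contains (PySem.Set.ofList "aeiou".toList) ch then v + 1 else v) 0

/-- the balance value vowels − consonants of one string -/
def pvSval (s : String) : Int := 2 * pvV s - (s.toList.length : Int)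

/-- number of k with 1 ≤ k ≤ l.length and t + sum of the first k elements = 0 (A's inner loop) -/
def pvZ (t : Int) : List Int → Int
  | [] => 0
  | x :: xs => (if t + x = 0 then (1:Int) else 0) + pvZ (t + x) xs

/-- number of prefixes (length ≤ i) of vals with sum x -/
def pvOcc (vals : List Int) (i : ℕ) (x : Int) : Int :=
  ∑ t ∈ Finset.range (i + 1), if (vals.take t).sum = x then (1:Int) else 0

/-- B's counting loop, abstracted over the frequency table occ -/
def pvBcf (occ : Int → Int) (p : Int) : List Int → Int
  | [] => 0
  | x :: xs => occ (p + x) + pvBcf (fun y => if y = p + x then occ y + 1 else occ y) (p + x) xs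

theorem pvZ_fold (l : List Int) : ∀ (t c : Int),
    l.foldl (fun (p : Int × Int) x => (p.1 + x, if p.1 + x = 0 then p.2 + 1 else p.2)) (t, c)
      = (t + l.sum, c + pvZ t l) := by
  induction l with
  | nil => intro t c; simp [pvZ]
  | cons x xs ih =>
    intro t c
    simp only [List.foldl_cons, List.sum_cons, pvZ, ih, Prod.mk.injEq]
    constructor
    · ring
    · by_cases h : t + x = 0
      · simp only [if_pos h]; ring
      · simp only [if_neg h]; ring

theorem pvZ_sum (l : List Int) : ∀ (t : Int),
    pvZ t l = ∑ k ∈ Finset.range l.length, if t + (l.take (k + 1)).sum = 0 then (1:Int) else 0 := by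
  induction l with
  | nil => intro t; simp [pvZ]
  | cons x xs ih =>
    intro t
    rw [pvZ, ih (t + x), List.length_cons, Finset.sum_range_succ']
    simp only [List.take_succ_cons, List.sum_cons, List.take_zero, List.sum_nil, add_zero]
    rw [add_comm]
    congr 1
    refine Finset.sum_congr rfl (fun k _ => ?_)
    by_cases h : t + x + (xs.take (k + 1)).sum = 0
    · rw [if_pos h, if_pos (by omega)]
    · rw [if_neg h, if_neg (by omega)]

theorem pv_take_drop_sum (vals : List Int) (i k : ℕ) :
    (((vals.drop i).take k).sum : Int) = (vals.take (i + k)).sum - (vals.take i).sum := by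
  rw [List.take_add, List.sum_append]; ring

/-- A's count for one fixed start index i -/
theorem pvA_inner (vals : List Int) (i : ℕ) (_hi : i ≤ vals.length) :
    pvZ 0 (vals.drop i)
      = ∑ j ∈ Finset.Ico i vals.length,
          if (vals.take (j + 1)).sum = (vals.take i).sum then (1:Int) else 0 := by
  rw [pvZ_sum, Finset.sum_Ico_eq_sum_range, List.length_drop]
  refine Finset.sum_congr rfl (fun k _ => ?_)
  rw [pv_take_drop_sum]
  have h1 : i + (k + 1) = i + k + 1 := by omega
  rw [h1]
  by_cases h : (vals.take (i + k + 1)).sum = (vals.take i).sum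
  · rw [if_pos (by omega), if_pos h]
  · rw [if_neg (by omega), if_neg h]

theorem pv_foldl_add_zsum (m : ℕ) (g : ℕ → Int) :
    (List.range m).foldl (fun c k => c + g k) 0 = ∑ k ∈ Finset.range m, g k := by
  induction m with
  | zero => simp
  | succ m ih => rw [List.range_succ, List.foldl_append, Finset.sum_range_succ, ih]; simp

/-- A's port equals the start-index-grouped double sum -/
theorem pvA_eq (arr : List String) :
    countBalanced arr
      = ∑ i ∈ Finset.range (arr.length), ∑ j ∈ Finset.Ico i (arr.length),
          if ((arr.map pvSval).take (j + 1)).sum = ((arr.map pvSval).take i).sum then (1:Int) else 0 := by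
  simp only [countBalanced]
  rw [PySem.List.foldl_append_singleton_eq_map (fun s =>
    s.toList.foldl (fun v ch => if PySem.Set.contains (PySem.Set.ofList "aeiou".toList) ch then v + 1 else v) 0
      - (PySem.Str.len s -
         s.toList.foldl (fun v ch => if PySem.Set.contains (PySem.Set.ofList "aeiou".toList) ch then v + 1 else v) 0))]
  simp only [List.nil_append]
  set vals := arr.map (fun s =>
    s.toList.foldl (fun v ch => if PySem.Set.contains (PySem.Set.ofList "aeiou".toList) ch then v + 1 else v) 0
      - (PySem.Str.len s -
         s.toList.foldl (fun v ch => if PySem.Set.contains (PySem.Set.ofList "aeiou".toList) ch then v + 1 else v) 0)) with hvals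
  have hv : vals = arr.map pvSval := by
    rw [hvals]
    refine List.map_congr_left (fun s _ => ?_)
    simp only [pvSval, pvV, PySem.Str.len_eq]
    ring
  have houter : ∀ count (i : Int), 0 ≤ i →
      ((PySem.List.pyRange i (PySem.List.len vals) 1).foldl
        (fun (p : Int × Int) j =>
          (p.1 + PySem.List.pyGetD vals j 0,
            if p.1 + PySem.List.pyGetD vals j 0 = 0 then p.2 + 1 else p.2)) (0, count)).2
        = count + pvZ 0 (vals.drop i.toNat) := by
    intro count i h0
    rw [PySem.List.foldl_pyRange_pyGetD vals 0
      (fun (p : Int × Int) x => (p.1 + x, if p.1 + x = 0 then p.2 + 1 else p.2)) (0, count) h0]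
    rw [pvZ_fold]
  rw [PySem.List.foldl_congr_mem _ _
    (fun count i => count + pvZ 0 (vals.drop i.toNat)) 0
    (by
      intro acc x hx
      have hx' : 0 ≤ x := by
        have := (PySem.List.mem_pyRange_one.mp hx).1
        omega
      exact houter acc x hx')]
  rw [PySem.List.len_eq, PySem.List.pyRange_zero_nat vals.length]
  rw [List.foldl_map]
  simp only [Int.toNat_natCast]
  rw [pv_foldl_add_zsum]
  have hlen : vals.length = arr.length := by rw [hv]; simp
  rw [hlen]
  refine Finset.sum_congr rfl (fun i hi => ?_)
  rw [pvA_inner vals i (by rw [hlen]; exact Nat.le_of_lt (Finset.mem_range.mp hi)), hlen, hv]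

theorem pvBcf_congr (l : List Int) : ∀ (occ occ' : Int → Int) (p : Int),
    (∀ x, occ x = occ' x) → pvBcf occ p l = pvBcf occ' p l := by
  induction l with
  | nil => intro _ _ _ _; rfl
  | cons x xs ih =>
    intro occ occ' p h
    simp only [pvBcf, h]

theorem pvB_fold {α : Type} (f : α → Int) (l : List α) : ∀ (seen : PySem.Dict Int Int) (p c : Int),
    (l.foldl (fun (st : PySem.Dict Int Int × Int × Int) s =>
        (st.1.insert (st.2.1 + f s) (st.1.getD (st.2.1 + f s) 0 + 1), st.2.1 + f s,
          st.2.2 + st.1.getD (st.2.1 + f s) 0)) (seen, p, c)).2.2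
      = c + pvBcf (fun x => seen.getD x 0) p (l.map f) := by
  induction l with
  | nil => intro seen p c; simp [pvBcf]
  | cons s l ih =>
    intro seen p c
    simp only [List.foldl_cons, List.map_cons, pvBcf]
    rw [ih]
    rw [pvBcf_congr (l.map f) (fun y => (seen.insert (p + f s) (seen.getD (p + f s) 0 + 1)).getD y 0)
      (fun y => if y = p + f s then seen.getD y 0 + 1 else seen.getD y 0) (p + f s)
      (fun y => by
        simp only [PySem.Dict.getD_insert]
        by_cases hy : y = p + f s <;> simp [hy])]
    ring

theorem pvOcc_succ (vals : List Int) (i : ℕ) (y : Int) :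
    pvOcc vals (i + 1) y
      = (if y = (vals.take (i + 1)).sum then pvOcc vals i y + 1 else pvOcc vals i y) := by
  unfold pvOcc
  rw [Finset.sum_range_succ]
  by_cases h : (vals.take (i + 1)).sum = y
  · rw [if_pos h, if_pos h.symm]
  · rw [if_neg h, if_neg (fun hy => h hy.symm), add_zero]

theorem pvB_bcf (vals : List Int) : ∀ (l : List Int) (i : ℕ), l = vals.drop i →
    pvBcf (pvOcc vals i) ((vals.take i).sum) l
      = ∑ j ∈ Finset.Ico i vals.length, pvOcc vals j ((vals.take (j + 1)).sum) := by
  intro l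
  induction l with
  | nil =>
    intro i hl
    have : vals.length ≤ i := List.drop_eq_nil_iff.mp hl.symm
    rw [Finset.Ico_eq_empty (by omega)]
    rfl
  | cons x xs ih =>
    intro i hl
    have hi : i < vals.length := by
      by_contra h
      rw [List.drop_eq_nil_iff.mpr (by omega)] at hl
      exact List.cons_ne_nil x xs hl
    have hd := List.drop_eq_getElem_cons hi
    rw [hd] at hl
    have hx : x = vals[i] := (List.cons.injEq _ _ _ _ ▸ hl).1
    have hxs : xs = vals.drop (i + 1) := (List.cons.injEq _ _ _ _ ▸ hl).2
    have hsum : (vals.take i).sum + x = (vals.take (i + 1)).sum := by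
      rw [List.sum_take_succ vals i hi, hx]
    rw [pvBcf, hsum]
    rw [pvBcf_congr xs (fun y => if y = (vals.take (i + 1)).sum then pvOcc vals i y + 1 else pvOcc vals i y)
      (pvOcc vals (i + 1)) ((vals.take (i + 1)).sum)
      (fun y => (pvOcc_succ vals i y).symm)]
    rw [ih (i + 1) hxs]
    rw [Finset.sum_eq_sum_Ico_succ_bot hi]

/-- B's port equals the end-index-grouped double sum -/
theorem pvB_eq (arr : List String) :
    countBalanced_alt arr
      = ∑ j ∈ Finset.Ico 0 (arr.length), pvOcc (arr.map pvSval) j (((arr.map pvSval).take (j + 1)).sum) := by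
  simp only [countBalanced_alt]
  rw [PySem.List.foldl_congr_mem arr _
    (fun (st : PySem.Dict Int Int × Int × Int) s =>
      (st.1.insert (st.2.1 + pvSval s) (st.1.getD (st.2.1 + pvSval s) 0 + 1), st.2.1 + pvSval s,
        st.2.2 + st.1.getD (st.2.1 + pvSval s) 0))
    ((PySem.Dict.empty : PySem.Dict Int Int).insert 0 1, 0, 0)
    (by
      intro st s _
      have h : st.2.1 + 2 * (pvV s) - PySem.Str.len s = st.2.1 + pvSval s := by
        simp only [pvSval, PySem.Str.len_eq]; ring
      simp only [pvV] at h
      rw [h])]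
  rw [pvB_fold pvSval arr]
  have hocc : ∀ x : Int, ((PySem.Dict.empty : PySem.Dict Int Int).insert 0 1).getD x 0 = pvOcc (arr.map pvSval) 0 x := by
    intro x
    rw [PySem.Dict.getD_insert, PySem.Dict.getD_empty, pvOcc, Finset.sum_range_one]
    simp only [List.take_zero, List.sum_nil]
    by_cases h : x = 0
    · rw [if_pos h, if_pos h.symm]
    · rw [if_neg h, if_neg (fun hh => h hh.symm)]
  rw [pvBcf_congr _ _ _ 0 hocc]
  have h0 : (0:Int) = ((arr.map pvSval).take 0).sum := by simp
  rw [h0, pvB_bcf (arr.map pvSval) (arr.map pvSval) 0 (by simp)]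
  simp

-- ===== VERDICT (by name: the statement is the Claim_ definition above) =====
theorem countBalanced_spec : Claim_equal_countBalanced := by
  intro arr _
  unfold Spec_countBalanced
  rw [pvA_eq, pvB_eq]
  rw [Finset.range_eq_Ico, Finset.sum_Ico_Ico_comm]
  refine Finset.sum_congr rfl (fun j hj => ?_)
  unfold pvOcc
  rw [Finset.range_eq_Ico]
  refine Finset.sum_congr rfl (fun i _ => ?_)
  by_cases h : ((arr.map pvSval).take (j + 1)).sum = ((arr.map pvSval).take i).sum
  · rw [if_pos h, if_pos h.symm]
  · rw [if_neg h, if_neg (fun hh => h hh.symm)]
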